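-- pv_equiv track=rewrite | github.com/shreypjain/non | experiments/multi_arm_bandit/encoding.py | encode_strategy
-- ===== SOURCE A (Python) =====
-- import math
-- from typing import List
--
-- def bits_per_arm(num_arms: int) -> int:
--     """
--     Calculate the number of bits needed to represent an arm choice.
--
--     Args:
--         num_arms: Number of arms in the bandit problem
--
--     Returns:
--         Number of bits required to encode arm indices
--     """
--     if num_arms <= 0:
--         raise ValueError("Number of arms must be positive")
--     return math.ceil(math.log2(num_arms))
--
-- def encode_strategy(strategy: List[int], num_arms: int) -> List[int]:
--     """
--     Encode an arm-pulling strategy as a binary chromosome.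
--
--     Args:
--         strategy: List of arm indices to pull at each time step
--         num_arms: Number of arms in the bandit problem
--
--     Returns:
--         Binary chromosome representation (list of 0s and 1s)
--
--     Example:
--         >>> encode_strategy([0, 1, 2, 3], num_arms=4)
--         [0, 0, 0, 1, 1, 0, 1, 1]  # 2 bits per arm: 00, 01, 10, 11
--     """
--     bits_per = bits_per_arm(num_arms)
--     chromosome = []
--
--     for arm in strategy:
--         if arm < 0 or arm >= num_arms:
--             raise ValueError(f"Invalid arm index {arm} for {num_arms} arms")
--
--         # Convert arm index to binary representation
--         arm_bits = [(arm >> i) & 1 for i in range(bits_per - 1, -1, -1)]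
--         chromosome.extend(arm_bits)
--
--     return chromosome
-- ===== SOURCE B (Python) =====
-- def encode_strategy(strategy, num_arms):
--     if num_arms <= 0:
--         raise ValueError("Number of arms must be positive")
--     width = (num_arms - 1).bit_length()
--     for arm in strategy:
--         if arm < 0 or arm >= num_arms:
--             raise ValueError(f"Invalid arm index {arm} for {num_arms} arms")
--     table = {}
--     for arm in set(strategy):
--         bits = []
--         x = arm
--         for _ in range(width):
--             bits.append(x % 2)
--             x //= 2
--         bits.reverse()
--         table[arm] = bits
--     return [b for arm in strategy for b in table[arm]]
-- ===== Notes on version B (the rewrite author's own statement) =====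
-- stated objective: alternative
-- what changed: B computes the bit width once with integer bit_length instead of float ceil(log2), validates the whole strategy in a separate pass, precomputes each distinct arm's bit pattern once in a table (LSB divmod loop + reverse instead of an MSB shift comprehension), and emits the chromosome as one flatten over table lookups.
import Mathlib
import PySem

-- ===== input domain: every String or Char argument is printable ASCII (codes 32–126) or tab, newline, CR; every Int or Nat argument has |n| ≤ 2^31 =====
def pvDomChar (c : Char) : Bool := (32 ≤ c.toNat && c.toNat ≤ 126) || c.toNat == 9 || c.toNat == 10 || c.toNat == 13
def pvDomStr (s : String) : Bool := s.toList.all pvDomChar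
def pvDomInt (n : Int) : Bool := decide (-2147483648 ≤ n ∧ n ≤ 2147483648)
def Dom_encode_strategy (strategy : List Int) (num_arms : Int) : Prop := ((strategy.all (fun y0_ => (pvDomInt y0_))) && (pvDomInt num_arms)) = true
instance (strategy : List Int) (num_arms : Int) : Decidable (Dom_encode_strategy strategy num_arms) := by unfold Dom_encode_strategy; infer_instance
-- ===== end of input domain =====

-- B replaces A's per-step ceil(log2)+shift recomputation by a bit_length width, a one-pass
-- validation, and a bits table built once over the distinct arms (objective: alternative).

-- ===== PORT A =====
-- math.ceil(math.log2(n)) ported as Nat.clog 2 n: exact on the admitted domain 1 ≤ n ≤ 2^31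
-- (math.log2 is correctly rounded there, so the float ceiling equals the integer one).
-- On num_arms ≤ 0 the Python raises ValueError; the port returns 0 (outside Pre_).
def bits_per_arm (num_arms : Int) : Int :=
  if num_arms ≤ 0 then 0
  else (Nat.clog 2 num_arms.toNat : Int)

-- [(arm >> i) & 1 for i in range(bits_per - 1, -1, -1)]; '>>'/'&' are Int's '>>>'/PySem.Int.band
-- (i ≥ 0 throughout the range, so i.toNat is exact).
def pvArmBitsA (arm bits_per : Int) : List Int :=
  (PySem.List.pyRange (bits_per - 1) (-1) (-1)).map
    (fun i => PySem.Int.band (arm >>> i.toNat) 1)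

-- the 'for arm in strategy' loop; on an invalid arm the Python raises ValueError (port: [], outside Pre_)
def pvEncodeGoA (num_arms bits_per : Int) : List Int → List Int
  | [] => []
  | arm :: rest =>
    if arm < 0 ∨ num_arms ≤ arm then []
    else pvArmBitsA arm bits_per ++ pvEncodeGoA num_arms bits_per rest

def encode_strategy (strategy : List Int) (num_arms : Int) : List Int :=
  if num_arms ≤ 0 then []   -- bits_per_arm raises here
  else pvEncodeGoA num_arms (bits_per_arm num_arms) strategy

-- ===== PORT B =====
-- the inner 'for _ in range(width): bits.append(x % 2); x //= 2' loop, in append order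
def pvBitsLoopB : Nat → Int → List Int
  | 0, _ => []
  | w + 1, x => PySem.Int.mod x 2 :: pvBitsLoopB w (PySem.Int.floordiv x 2)

def encode_strategy_alt (strategy : List Int) (num_arms : Int) : List Int :=
  if num_arms ≤ 0 then []   -- Python B raises ValueError (outside Pre_)
  else
    let width := PySem.Int.bitLength (num_arms - 1)
    if strategy.any (fun a => decide (a < 0) || decide (num_arms ≤ a)) then []  -- validation pass raises (outside Pre_)
    else
      -- table built once over set(strategy), only looked up afterwards
      let table := (PySem.Set.ofList strategy).foldl
        (fun d arm => d.insert arm ((pvBitsLoopB width arm).reverse)) PySem.Dict.empty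
      strategy.flatMap (fun arm => table.getD arm [])

-- ===== PRECONDITION & SPEC =====
-- Pre_ excludes exactly where A raises ValueError: num_arms ≤ 0, or an arm outside [0, num_arms).
def Pre_encode_strategy (strategy : List Int) (num_arms : Int) : Prop :=
  0 < num_arms ∧ ∀ a ∈ strategy, 0 ≤ a ∧ a < num_arms
instance (strategy : List Int) (num_arms : Int) : Decidable (Pre_encode_strategy strategy num_arms) := by unfold Pre_encode_strategy; infer_instance

def pvWitness_encode_strategy : List Int × Int := ([0, 1, 2, 3], 4)

def Spec_encode_strategy (strategy : List Int) (num_arms : Int) (out : List Int) : Prop := out = encode_strategy_alt strategy num_arms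
instance (strategy : List Int) (num_arms : Int) (out : List Int) : Decidable (Spec_encode_strategy strategy num_arms out) := by unfold Spec_encode_strategy; infer_instance

-- ===== CLAIM (what is proved, stated in full; the proofs are below) =====
def Claim_equal_encode_strategy : Prop := ∀ (strategy : List Int) (num_arms : Int), Dom_encode_strategy strategy num_arms → Pre_encode_strategy strategy num_arms → Spec_encode_strategy strategy num_arms (encode_strategy strategy num_arms)

-- ===== LEMMAS AND PROOFS =====

-- widths agree: ceil(log2 n) = (n-1).bit_length() for n ≥ 1
theorem pv_width_eq (n : Int) (hn : 0 < n) :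
    Nat.clog 2 n.toNat = PySem.Int.bitLength (n - 1) := by
  rcases eq_or_lt_of_le (by omega : (1 : Int) ≤ n) with h1 | h2
  · simp [← h1, PySem.Int.bitLength_zero]
  · set k := PySem.Int.bitLength (n - 1) with hk
    have hne : n - 1 ≠ 0 := by omega
    have hlo : 2 ^ (k - 1) ≤ (n - 1).natAbs := PySem.Int.two_pow_bitLength_le _ hne
    have hhi : (n - 1).natAbs < 2 ^ k := PySem.Int.lt_two_pow_bitLength _
    have habs : ((n - 1).natAbs : Int) = n - 1 := Int.natAbs_of_nonneg (by omega)
    have hkpos : 0 < k := by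
      by_contra h
      have : k = 0 := by omega
      rw [this] at hhi
      omega
    -- translate the bracket 2^(k-1) ≤ n-1 < 2^k to n.toNat
    have hlo' : 2 ^ (k - 1) < n.toNat := by omega
    have hhi' : n.toNat ≤ 2 ^ k := by omega
    have h1 : Nat.clog 2 n.toNat ≤ k := (Nat.clog_le_iff_le_pow (by norm_num)).mpr hhi'
    have h2 : k - 1 < Nat.clog 2 n.toNat := (Nat.lt_clog_iff_pow_lt (by norm_num)).mpr hlo'
    omega

-- B's LSB loop over a nonnegative value, as a map over List.range
theorem pv_bitsLoop_eq_range (w : Nat) (m : Nat) :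
    pvBitsLoopB w (m : Int) = (List.range w).map (fun k => (((m >>> k) % 2 : Nat) : Int)) := by
  induction w generalizing m with
  | zero => simp [pvBitsLoopB]
  | succ w ih =>
    rw [List.range_succ_eq_map]
    simp only [pvBitsLoopB, List.map_cons, List.map_map]
    have hmod : PySem.Int.mod (m : Int) 2 = ((m % 2 : Nat) : Int) := by
      exact_mod_cast PySem.Int.mod_natCast m 2
    have hdiv : PySem.Int.floordiv (m : Int) 2 = ((m / 2 : Nat) : Int) := by
      exact_mod_cast PySem.Int.floordiv_natCast m 2
    rw [hmod, hdiv, ih]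
    refine congrArg₂ List.cons (by simp) ?_
    apply List.map_congr_left
    intro k _
    simp only [Function.comp_apply]
    congr 2
    rw [Nat.succ_eq_add_one, Nat.add_comm, Nat.shiftRight_add, Nat.shiftRight_one]

-- A's MSB-first comprehension equals B's reversed LSB loop (same width, nonnegative arm)
theorem pv_bits_eq (w : Nat) (m : Nat) :
    pvArmBitsA (m : Int) (w : Int) = (pvBitsLoopB w (m : Int)).reverse := by
  unfold pvArmBitsA
  rw [PySem.List.pyRange_neg_one_eq_reverse]
  rw [show ((-1 : Int) + 1) = 0 by ring, show ((w : Int) - 1 + 1) = (w : Int) by ring]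
  rw [List.map_reverse, pv_bitsLoop_eq_range]
  congr 1
  rw [PySem.List.pyRange_one 0 w]
  simp only [sub_zero, Int.toNat_natCast, List.map_map]
  apply List.map_congr_left
  intro k hk
  simp only [Function.comp_apply, zero_add, Int.toNat_natCast]
  have hsh : ((m : Int) >>> ((k : Nat) : Int)) = ((m >>> k : Nat) : Int) := by simp
  rw [hsh]
  rw [show (1 : Int) = ((1 : Nat) : Int) by norm_num, PySem.Int.band_natCast]
  congr 1
  exact Nat.and_one_is_mod _

-- table lookup: a fold of inserts of (a, f a) returns f arm for any arm in the list
theorem pv_getD_foldl_insert (f : Int → List Int) (l : List Int) (d : PySem.Dict Int (List Int))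
    (arm : Int) (h : arm ∈ l ∨ d.getD arm [] = f arm) :
    (l.foldl (fun d a => d.insert a (f a)) d).getD arm [] = f arm := by
  induction l generalizing d with
  | nil => simpa using h
  | cons a rest ih =>
    simp only [List.foldl_cons]
    apply ih
    by_cases hae : arm = a
    · subst hae
      right
      exact PySem.Dict.getD_insert_self d arm (f arm) []
    · rcases h with h | h
      · rcases List.mem_cons.mp h with h' | h'
        · exact absurd h' hae
        · exact Or.inl h'
      · right
        rw [PySem.Dict.getD_insert_of_ne d (f a) [] hae]
        exact h

-- A's loop under validity is a flatMap of the per-arm bits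
theorem pv_goA_eq_flatMap (num_arms bits_per : Int) (l : List Int)
    (hv : ∀ a ∈ l, 0 ≤ a ∧ a < num_arms) :
    pvEncodeGoA num_arms bits_per l = l.flatMap (fun arm => pvArmBitsA arm bits_per) := by
  induction l with
  | nil => simp [pvEncodeGoA]
  | cons a rest ih =>
    have ha := hv a (List.mem_cons_self)
    rw [pvEncodeGoA, if_neg (by omega), List.flatMap_cons,
      ih (fun x hx => hv x (List.mem_cons_of_mem a hx))]

-- flatMap respects pointwise equality on members
theorem pv_flatMap_congr {f g : Int → List Int} {l : List Int}
    (h : ∀ a ∈ l, f a = g a) : l.flatMap f = l.flatMap g := by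
  induction l with
  | nil => rfl
  | cons a rest ih =>
    rw [List.flatMap_cons, List.flatMap_cons, h a List.mem_cons_self,
      ih (fun x hx => h x (List.mem_cons_of_mem a hx))]

-- ===== VERDICT (by name: the statement is the Claim_ definition above) =====
theorem encode_strategy_spec : Claim_equal_encode_strategy := by
  intro strategy num_arms _ hpre
  obtain ⟨hn, hv⟩ := hpre
  unfold Spec_encode_strategy encode_strategy encode_strategy_alt
  rw [if_neg (by omega), if_neg (by omega)]
  have hany : strategy.any (fun a => decide (a < 0) || decide (num_arms ≤ a)) = false := by
    rw [List.any_eq_false]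
    intro a ha
    have := hv a ha
    simp only [Bool.or_eq_true, decide_eq_true_eq, not_or]
    omega
  rw [if_neg (by simp [hany])]
  rw [pv_goA_eq_flatMap num_arms (bits_per_arm num_arms) strategy hv]
  apply pv_flatMap_congr
  intro a ha
  obtain ⟨ha0, han⟩ := hv a ha
  rw [pv_getD_foldl_insert _ _ _ _ (Or.inl ((PySem.Set.mem_ofList _ _).mpr ha))]
  have hbp : bits_per_arm num_arms = ((PySem.Int.bitLength (num_arms - 1) : Nat) : Int) := by
    unfold bits_per_arm
    rw [if_neg (by omega), pv_width_eq num_arms hn]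
  rw [hbp, show a = ((a.toNat : Nat) : Int) by omega]
  exact pv_bits_eq _ _
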